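-- pv_equiv track=rewrite | github.com/seieric/chess-search | modules/board.py | _create_op_maps
-- ===== SOURCE A (Python) =====
-- def _create_op_maps(size: tuple[int, int]) -> list[list[int]]:
--     """対称変換用のマッピングを作成する
--
--     Args:
--         size (tuple[int, int]): ボードのサイズ（縦, 横）
--
--     Returns:
--         list[list[int]]: 各対称変換に対応するインデックスマッピングのリスト
--     """
--     board_len = size[0] * size[1]
--     ops = [
--         (lambda r, c: r, lambda r, c: c),  # Identity
--         (lambda r, c: r, lambda r, c: size[1] - 1 - c),  # Horizontal Mirror
--         (lambda r, c: size[0] - 1 - r, lambda r, c: c),  # Vertical Mirror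
--         (lambda r, c: size[0] - 1 - r, lambda r, c: size[1] - 1 - c),  # 180 Rotate
--     ]
--
--     # 正方形の場合は対角系も追加
--     if size[0] == size[1]:
--         ops.extend(
--             [
--                 (lambda r, c: c, lambda r, c: r),  # Transpose (Diagonal)
--                 (
--                     lambda r, c: size[1] - 1 - c,
--                     lambda r, c: size[0] - 1 - r,
--                 ),  # Anti-transpose
--                 (lambda r, c: c, lambda r, c: size[0] - 1 - r),  # 90 Rotate
--                 (lambda r, c: size[1] - 1 - c, lambda r, c: r),  # 270 Rotate
--             ]
--         )
--
--     op_maps: list[list[int]] = []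
--     for r_op, c_op in ops:
--         op_map: list[int] = [0] * board_len
--         for r in range(size[0]):
--             for c in range(size[1]):
--                 new_r, new_c = r_op(r, c), c_op(r, c)
--                 op_map[r * size[1] + c] = new_r * size[1] + new_c
--         op_maps.append(op_map)
--
--     return op_maps
-- ===== SOURCE B (Python) =====
-- def _create_op_maps(size: tuple[int, int]) -> list[list[int]]:
--     """Build base mirror/transpose permutation maps from coordinates and
--     derive the remaining symmetry maps by composing permutation arrays."""
--     rows, cols = size
--
--     def compose(f, g):
--         # (f o g)[i] = f[g[i]]
--         return [f[j] for j in g]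
--
--     cells = [(r, c) for r in range(rows) for c in range(cols)]
--     ident = [r * cols + c for r, c in cells]
--     hm = [r * cols + (cols - 1 - c) for r, c in cells]
--     vm = [(rows - 1 - r) * cols + c for r, c in cells]
--     maps = [ident, hm, vm, compose(hm, vm)]
--     if rows == cols:
--         tr = [c * cols + r for r, c in cells]
--         maps.extend([tr, compose(tr, compose(hm, vm)), compose(tr, vm), compose(tr, hm)])
--     return maps
-- ===== Notes on version B (the rewrite author's own statement) =====
-- stated objective: alternative
-- what changed: Instead of filling a preallocated [0]*n array via a nested row/column loop for each of the 4 (or 8) coordinate-formula ops, B builds only the three base permutation arrays (identity, horizontal mirror, vertical mirror, plus transpose when square) by comprehension and derives 180/anti-transpose/90/270 by composing permutation arrays (compose(f,g)[i]=f[g[i]]).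
-- intended difference: On sizes with both dimensions negative, A returns 4 (8 when equal) maps made of rows*cols zeros -- an artefact of its [0]*(rows*cols) preallocation whose filling loops never run -- while B returns empty maps, the intended value since a board with negative dimensions has no cells. — e.g. on _create_op_maps(-1, -1): A returns [[0], [0], [0], [0], [0], [0], [0], [0]], B returns [[], [], [], [], [], [], [], []]
import Mathlib
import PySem

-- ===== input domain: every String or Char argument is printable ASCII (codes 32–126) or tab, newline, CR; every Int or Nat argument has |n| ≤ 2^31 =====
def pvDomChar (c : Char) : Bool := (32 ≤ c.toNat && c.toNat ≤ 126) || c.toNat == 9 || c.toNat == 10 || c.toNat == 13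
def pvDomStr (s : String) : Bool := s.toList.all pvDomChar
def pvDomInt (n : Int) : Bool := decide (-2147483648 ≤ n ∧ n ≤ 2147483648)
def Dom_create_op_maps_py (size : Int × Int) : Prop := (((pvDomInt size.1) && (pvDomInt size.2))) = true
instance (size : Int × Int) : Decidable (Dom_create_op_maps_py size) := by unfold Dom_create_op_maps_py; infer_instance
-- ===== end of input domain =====

-- B derives the non-base symmetry maps by composing permutation arrays instead of
-- re-deriving every map from coordinate formulas into a preallocated array (objective: alternative).

-- ===== PORT A =====
-- The Python list assignment op_map[r*size[1]+c] = … is always in range when the loops run,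
-- so the total pySetD is exact here.
def create_op_maps_py (size : Int × Int) : List (List Int) :=
  let board_len := size.1 * size.2
  let ops : List ((Int → Int → Int) × (Int → Int → Int)) :=
    [(fun r _c => r, fun _r c => c),
     (fun r _c => r, fun _r c => size.2 - 1 - c),
     (fun r _c => size.1 - 1 - r, fun _r c => c),
     (fun r _c => size.1 - 1 - r, fun _r c => size.2 - 1 - c)]
  let ops := if size.1 = size.2 then
      ops ++ [(fun _r c => c, fun r _c => r),
              (fun _r c => size.2 - 1 - c, fun r _c => size.1 - 1 - r),
              (fun _r c => c, fun r _c => size.1 - 1 - r),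
              (fun _r c => size.2 - 1 - c, fun r _c => r)]
    else ops
  ops.foldl (fun op_maps op =>
      let op_map : List Int := List.replicate board_len.toNat 0
      let op_map := (PySem.List.pyRange 0 size.1 1).foldl (fun m r =>
          (PySem.List.pyRange 0 size.2 1).foldl (fun m c =>
              PySem.List.pySetD m (r * size.2 + c) (op.1 r c * size.2 + op.2 r c)) m) op_map
      op_maps ++ [op_map]) []

-- ===== PORT B =====
-- [f[j] for j in g]; every index j that Source B ever looks up is in range, so pyGetD's default is dead.
def composeMap (f g : List Int) : List Int :=
  g.map (fun j => PySem.List.pyGetD f j 0)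

def create_op_maps_py_alt (size : Int × Int) : List (List Int) :=
  let rows := size.1
  let cols := size.2
  let cells : List (Int × Int) :=
    (PySem.List.pyRange 0 rows 1).flatMap (fun r => (PySem.List.pyRange 0 cols 1).map (fun c => (r, c)))
  let ident := cells.map (fun p => p.1 * cols + p.2)
  let hm := cells.map (fun p => p.1 * cols + (cols - 1 - p.2))
  let vm := cells.map (fun p => (rows - 1 - p.1) * cols + p.2)
  let maps := [ident, hm, vm, composeMap hm vm]
  if rows = cols then
    let tr := cells.map (fun p => p.2 * cols + p.1)
    maps ++ [tr, composeMap tr (composeMap hm vm), composeMap tr vm, composeMap tr hm]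
  else maps

-- ===== PRECONDITION & SPEC =====
-- On sizes with both dimensions negative, A returns 4 (8 when equal) maps made of rows*cols zeros —
-- an artefact of its [0]*(rows*cols) preallocation whose filling loops never run — while B returns
-- empty maps, the intended value since a board with negative dimensions has no cells.
def D_create_op_maps_py (size : Int × Int) : Prop := size.1 < 0 ∧ size.2 < 0
instance (size : Int × Int) : Decidable (D_create_op_maps_py size) := by unfold D_create_op_maps_py; infer_instance

def Spec_create_op_maps_py (size : Int × Int) (out : List (List Int)) : Prop :=
  ¬ D_create_op_maps_py size → out = create_op_maps_py_alt size
instance (size : Int × Int) (out : List (List Int)) : Decidable (Spec_create_op_maps_py size out) := by unfold Spec_create_op_maps_py; infer_instance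

def pvDiffWitness_create_op_maps_py : (Int × Int) := (-1, -1)
def pvDiffWitnessOut_create_op_maps_py : (List (List Int)) × (List (List Int)) :=
  ([[0], [0], [0], [0], [0], [0], [0], [0]], [[], [], [], [], [], [], [], []])

-- ===== CLAIM (what is proved, stated in full; the proofs are below) =====
def Claim_unchanged_create_op_maps_py : Prop := ∀ (size : Int × Int), Dom_create_op_maps_py size → Spec_create_op_maps_py size (create_op_maps_py size)
def Claim_changed_create_op_maps_py : Prop := Dom_create_op_maps_py (pvDiffWitness_create_op_maps_py) ∧ D_create_op_maps_py (pvDiffWitness_create_op_maps_py) ∧ create_op_maps_py (pvDiffWitness_create_op_maps_py) = pvDiffWitnessOut_create_op_maps_py.1 ∧ create_op_maps_py_alt (pvDiffWitness_create_op_maps_py) = pvDiffWitnessOut_create_op_maps_py.2 ∧ pvDiffWitnessOut_create_op_maps_py.1 ≠ pvDiffWitnessOut_create_op_maps_py.2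
def Claim_exact_create_op_maps_py : Prop := ∀ (size : Int × Int), Dom_create_op_maps_py size → D_create_op_maps_py size → create_op_maps_py size ≠ create_op_maps_py_alt size

-- ===== LEMMAS AND PROOFS =====

-- the canonical row-major grid list: entry at index r*n+c is v r c
def GridN (m n : Nat) (v : Nat → Nat → Int) : List Int :=
  (List.range m).flatMap (fun r => (List.range n).map (v r))

theorem gridN_length (m n : Nat) (v : Nat → Nat → Int) : (GridN m n v).length = m * n := by
  simp [GridN, List.length_flatMap]

theorem gridN_norm (m n : Nat) (v : Nat → Nat → Int) :
    GridN m n v = (List.range (m * n)).map (fun i => v (i / n) (i % n)) := by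
  induction m with
  | zero => simp [GridN]
  | succ m ih =>
    rw [GridN, List.range_succ, List.flatMap_append, ← GridN, ih,
        Nat.succ_mul, List.range_add, List.map_append, List.map_map]
    congr 1
    simp only [List.flatMap_cons, List.flatMap_nil, List.append_nil]
    apply List.map_congr_left
    intro c hc
    have hcn : c < n := List.mem_range.mp hc
    have hn : 0 < n := by omega
    simp only [Function.comp]
    rw [Nat.mul_comm m n]
    rw [Nat.mul_add_div hn, Nat.mul_add_mod, Nat.div_eq_of_lt hcn, Nat.mod_eq_of_lt hcn, Nat.add_zero]

theorem gridN_congr (m n : Nat) (v w : Nat → Nat → Int)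
    (h : ∀ r < m, ∀ c < n, v r c = w r c) : GridN m n v = GridN m n w := by
  unfold GridN
  apply List.flatMap_congr
  intro r hr
  apply List.map_congr_left
  intro c hc
  exact h r (List.mem_range.mp hr) c (List.mem_range.mp hc)

theorem gridN_get (m n : Nat) (v : Nat → Nat → Int) (r c : Nat) (hr : r < m) (hc : c < n) :
    PySem.List.pyGetD (GridN m n v) ((r : Int) * (n : Int) + (c : Int)) 0 = v r c := by
  have hcast : ((r : Int) * (n : Int) + (c : Int)) = ((r * n + c : Nat) : Int) := by push_cast; ring
  rw [hcast, PySem.List.pyGetD_natCast, gridN_norm]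
  have hlt : r * n + c < m * n := by
    calc r * n + c < r * n + n := by omega
    _ = (r + 1) * n := by ring
    _ ≤ m * n := Nat.mul_le_mul_right n hr
  rw [List.getD_eq_getElem?_getD, List.getElem?_map, List.getElem?_range hlt]
  simp only [Option.map_some, Option.getD_some]
  have h1 : (r * n + c) / n = r := by
    rw [Nat.mul_comm r n]; rw [Nat.mul_add_div (by omega), Nat.div_eq_of_lt hc]; omega
  have h2 : (r * n + c) % n = c := by
    rw [Nat.mul_comm r n]; rw [Nat.mul_add_mod]; exact Nat.mod_eq_of_lt hc
  rw [h1, h2]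

theorem fill_row (n : Nat) (w : Nat → Int) (pre mid suf : List Int) (hmid : mid.length = n) :
    (List.range n).foldl (fun m c => m.set (pre.length + c) (w c)) (pre ++ mid ++ suf)
      = pre ++ (List.range n).map w ++ suf := by
  induction n generalizing mid suf with
  | zero => simp; cases mid with | nil => simp | cons => simp at hmid
  | succ n ih =>
    rw [List.range_succ, List.foldl_append, List.foldl_cons, List.foldl_nil]
    have htake : (mid.take n).length = n := by rw [List.length_take]; omega
    have hsplit : mid = mid.take n ++ mid.drop n := (List.take_append_drop n mid).symm
    have hdrop : ∃ x, mid.drop n = [x] := by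
      have : (mid.drop n).length = 1 := by rw [List.length_drop]; omega
      match h : mid.drop n with
      | [x] => exact ⟨x, rfl⟩
      | [] => rw [h] at this; simp at this
      | (x :: y :: t) => rw [h] at this; simp at this
    obtain ⟨x, hx⟩ := hdrop
    have := ih (mid.take n) (x :: suf) htake
    rw [hsplit, hx]
    simp only [List.append_assoc, List.singleton_append] at this ⊢
    rw [this]
    have hset : (pre ++ (List.map w (List.range n) ++ x :: suf)).set (pre.length + n) (w n)
        = pre ++ (List.map w (List.range n) ++ (w n) :: suf) := by simp
    rw [hset]
    simp

theorem fill_grid (m n : Nat) (v : Nat → Nat → Int) (suf : List Int) :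
    (List.range m).foldl (fun mem r =>
        (List.range n).foldl (fun mem c => mem.set (r * n + c) (v r c)) mem)
      (List.replicate (m * n) 0 ++ suf)
      = GridN m n v ++ suf := by
  induction m generalizing suf with
  | zero => simp [GridN]
  | succ m ih =>
    rw [List.range_succ, List.foldl_append, List.foldl_cons, List.foldl_nil]
    have hrepl : List.replicate ((m+1) * n) (0:Int) = List.replicate (m*n) 0 ++ List.replicate n 0 := by
      have h : (m+1) * n = m*n + n := by ring
      rw [h, List.replicate_add]
    rw [hrepl, List.append_assoc, ih (List.replicate n 0 ++ suf)]
    have hfr := fill_row n (v m) (GridN m n v) (List.replicate n 0) suf (by simp)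
    rw [gridN_length] at hfr
    rw [← List.append_assoc, hfr]
    simp [GridN, List.range_succ]

-- A's per-op map builder (proof-side name for the body of A's loop)
def mkA (a b : Int) (f g : Int → Int → Int) : List Int :=
  (PySem.List.pyRange 0 a 1).foldl (fun m r =>
      (PySem.List.pyRange 0 b 1).foldl (fun m c =>
          PySem.List.pySetD m (r * b + c) (f r c * b + g r c)) m)
    (List.replicate (a * b).toNat 0)

theorem pyRange_zero_map (m : Nat) :
    PySem.List.pyRange 0 (m : Int) 1 = List.map (fun (k : Nat) => (k : Int)) (List.range m) := by
  rw [PySem.List.pyRange_one]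
  simp only [Int.sub_zero, Int.toNat_natCast, zero_add]

theorem mkA_eq_gridN (m n : Nat) (f g : Int → Int → Int) :
    mkA (m : Int) (n : Int) f g = GridN m n (fun r c => f r c * n + g r c) := by
  unfold mkA
  rw [pyRange_zero_map, pyRange_zero_map, List.foldl_map]
  have hfun : (fun (mem : List Int) (r : Nat) =>
      (List.map (fun (k : Nat) => (k : Int)) (List.range n)).foldl (fun m c =>
          PySem.List.pySetD m ((r : Int) * n + c) (f r c * n + g r c)) mem)
      = (fun (mem : List Int) (r : Nat) =>
      (List.range n).foldl (fun mem c => mem.set (r * n + c) (f (r : Int) (c : Int) * n + g r c)) mem) := by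
    funext mem r
    rw [List.foldl_map]
    apply PySem.List.foldl_congr_mem
    intro acc c _
    have hcast : ((r : Int) * n + (c : Nat)) = (((r * n + c : Nat)) : Int) := by push_cast; ring
    rw [hcast, PySem.List.pySetD_natCast]
  rw [hfun]
  have htn : ((m : Int) * n).toNat = m * n := by
    rw [← Nat.cast_mul, Int.toNat_natCast]
  rw [htn, ← List.append_nil (List.replicate (m*n) (0:Int)), fill_grid, List.append_nil]

theorem cells_map (m n : Nat) (h : Int × Int → Int) :
    (((PySem.List.pyRange 0 (m : Int) 1).flatMap (fun r =>
        (PySem.List.pyRange 0 (n : Int) 1).map (fun c => (r, c)))).map h)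
      = GridN m n (fun r c => h ((r : Int), (c : Int))) := by
  rw [pyRange_zero_map, pyRange_zero_map]
  simp only [GridN, List.map_flatMap, List.flatMap_map, List.map_map, Function.comp_def]

theorem composeMap_gridN (f : List Int) (m n : Nat) (g : Nat → Nat → Int) :
    composeMap f (GridN m n g) = GridN m n (fun r c => PySem.List.pyGetD f (g r c) 0) := by
  simp [composeMap, GridN, List.map_flatMap, List.map_map, Function.comp_def]

theorem A_eq (a b : Int) : create_op_maps_py (a, b) =
    (if a = b then
      [((fun r _c => r, fun _r c => c) : (Int → Int → Int) × (Int → Int → Int)),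
       (fun r _c => r, fun _r c => b - 1 - c),
       (fun r _c => a - 1 - r, fun _r c => c),
       (fun r _c => a - 1 - r, fun _r c => b - 1 - c),
       (fun _r c => c, fun r _c => r),
       (fun _r c => b - 1 - c, fun r _c => a - 1 - r),
       (fun _r c => c, fun r _c => a - 1 - r),
       (fun _r c => b - 1 - c, fun r _c => r)]
     else
      [((fun r _c => r, fun _r c => c) : (Int → Int → Int) × (Int → Int → Int)),
       (fun r _c => r, fun _r c => b - 1 - c),
       (fun r _c => a - 1 - r, fun _r c => c),
       (fun r _c => a - 1 - r, fun _r c => b - 1 - c)]).map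
      (fun op => mkA a b op.1 op.2) := by
  unfold create_op_maps_py mkA
  split <;> simp

theorem mkA_deg (a b : Int) (hab : a * b ≤ 0) (f g : Int → Int → Int) (h : a ≤ 0 ∨ b ≤ 0) :
    mkA a b f g = [] := by
  unfold mkA
  have hz : (a * b).toNat = 0 := by omega
  rw [hz]
  rcases h with h | h
  · rw [show PySem.List.pyRange 0 a 1 = [] from PySem.List.pyRange_one_eq_nil h, List.foldl_nil, List.replicate_zero]
  · rw [show PySem.List.pyRange 0 b 1 = [] from PySem.List.pyRange_one_eq_nil h]
    simp

theorem h180_lem (m n : Nat) :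
    composeMap (GridN m n (fun r c => (r : Int) * (n : Int) + ((n : Int) - 1 - (c : Int))))
        (GridN m n (fun r c => ((m : Int) - 1 - (r : Int)) * (n : Int) + (c : Int)))
      = GridN m n (fun r c => ((m : Int) - 1 - (r : Int)) * (n : Int) + ((n : Int) - 1 - (c : Int))) := by
  rw [composeMap_gridN]
  apply gridN_congr
  intro r hr c hc
  have h1 : ((m : Int) - 1 - (r : Int)) = ((m - 1 - r : Nat) : Int) := by omega
  rw [h1, gridN_get _ _ _ _ _ (by omega) hc, ← h1]

theorem main_deg_left (a b : Int) (ha : a < 0) (hb : 0 ≤ b) :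
    create_op_maps_py (a, b) = create_op_maps_py_alt (a, b) := by
  have hne : a ≠ b := by omega
  have hmul : a * b ≤ 0 := by nlinarith
  have hmk : ∀ f g : Int → Int → Int, mkA a b f g = [] :=
    fun f g => mkA_deg a b hmul f g (Or.inl ha.le)
  rw [A_eq, if_neg hne]
  simp only [List.map_cons, List.map_nil, hmk]
  simp [create_op_maps_py_alt, hne,
    show PySem.List.pyRange 0 a 1 = [] from PySem.List.pyRange_one_eq_nil ha.le, composeMap]

theorem main_deg_right (a b : Int) (ha : 0 ≤ a) (hb : b < 0) :
    create_op_maps_py (a, b) = create_op_maps_py_alt (a, b) := by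
  have hne : a ≠ b := by omega
  have hmul : a * b ≤ 0 := by nlinarith
  have hmk : ∀ f g : Int → Int → Int, mkA a b f g = [] :=
    fun f g => mkA_deg a b hmul f g (Or.inr hb.le)
  rw [A_eq, if_neg hne]
  simp only [List.map_cons, List.map_nil, hmk]
  simp [create_op_maps_py_alt, hne,
    show PySem.List.pyRange 0 b 1 = [] from PySem.List.pyRange_one_eq_nil hb.le, composeMap]

theorem main_rect (m n : Nat) (hmn : (m : Int) ≠ (n : Int)) :
    create_op_maps_py ((m : Int), (n : Int)) = create_op_maps_py_alt ((m : Int), (n : Int)) := by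
  rw [A_eq, if_neg hmn]
  simp only [List.map_cons, List.map_nil, mkA_eq_gridN]
  simp only [create_op_maps_py_alt]
  rw [if_neg hmn]
  simp only [cells_map]
  rw [h180_lem]

theorem hanti_lem (m : Nat) :
    composeMap (GridN m m (fun r c => (c : Int) * (m : Int) + (r : Int)))
        (GridN m m (fun r c => ((m : Int) - 1 - (r : Int)) * (m : Int) + ((m : Int) - 1 - (c : Int))))
      = GridN m m (fun r c => ((m : Int) - 1 - (c : Int)) * (m : Int) + ((m : Int) - 1 - (r : Int))) := by
  rw [composeMap_gridN]
  apply gridN_congr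
  intro r hr c hc
  have h1 : ((m : Int) - 1 - (r : Int)) = ((m - 1 - r : Nat) : Int) := by omega
  have h2 : ((m : Int) - 1 - (c : Int)) = ((m - 1 - c : Nat) : Int) := by omega
  rw [h1, h2, gridN_get _ _ _ _ _ (by omega) (by omega), ← h1, ← h2]

theorem h90_lem (m : Nat) :
    composeMap (GridN m m (fun r c => (c : Int) * (m : Int) + (r : Int)))
        (GridN m m (fun r c => ((m : Int) - 1 - (r : Int)) * (m : Int) + (c : Int)))
      = GridN m m (fun r c => (c : Int) * (m : Int) + ((m : Int) - 1 - (r : Int))) := by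
  rw [composeMap_gridN]
  apply gridN_congr
  intro r hr c hc
  have h1 : ((m : Int) - 1 - (r : Int)) = ((m - 1 - r : Nat) : Int) := by omega
  rw [h1, gridN_get _ _ _ _ _ (by omega) hc, ← h1]

theorem h270_lem (m : Nat) :
    composeMap (GridN m m (fun r c => (c : Int) * (m : Int) + (r : Int)))
        (GridN m m (fun r c => (r : Int) * (m : Int) + ((m : Int) - 1 - (c : Int))))
      = GridN m m (fun r c => ((m : Int) - 1 - (c : Int)) * (m : Int) + (r : Int)) := by
  rw [composeMap_gridN]
  apply gridN_congr
  intro r hr c hc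
  have h2 : ((m : Int) - 1 - (c : Int)) = ((m - 1 - c : Nat) : Int) := by omega
  rw [h2, gridN_get _ _ _ _ _ hr (by omega), ← h2]

theorem main_sq (m : Nat) :
    create_op_maps_py ((m : Int), (m : Int)) = create_op_maps_py_alt ((m : Int), (m : Int)) := by
  rw [A_eq, if_pos rfl]
  simp only [List.map_cons, List.map_nil, mkA_eq_gridN]
  simp only [create_op_maps_py_alt]
  simp only [if_true]
  simp only [cells_map]
  rw [h180_lem m m, hanti_lem, h90_lem, h270_lem]
  simp only [List.cons_append, List.nil_append]

-- ===== VERDICT (by name: the statement is the Claim_ definition above) =====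
theorem create_op_maps_py_spec : Claim_unchanged_create_op_maps_py := by
  intro size _ hnd
  obtain ⟨a, b⟩ := size
  simp only [D_create_op_maps_py, not_and, not_lt] at hnd
  rcases lt_or_ge a 0 with ha | ha
  · exact main_deg_left a b ha (hnd ha)
  · rcases lt_or_ge b 0 with hb | hb
    · exact main_deg_right a b ha hb
    · obtain ⟨m, rfl⟩ : ∃ m : Nat, a = (m : Int) := ⟨a.toNat, by omega⟩
      obtain ⟨n, rfl⟩ : ∃ n : Nat, b = (n : Int) := ⟨b.toNat, by omega⟩
      by_cases hmn : (m : Int) = (n : Int)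
      · obtain rfl : m = n := by exact_mod_cast hmn
        exact main_sq m
      · exact main_rect m n hmn

theorem create_op_maps_py_changed : Claim_changed_create_op_maps_py := by
  unfold Claim_changed_create_op_maps_py; decide

theorem create_op_maps_py_tight : Claim_exact_create_op_maps_py := by
  unfold Claim_exact_create_op_maps_py
  intro size _ hd heq
  obtain ⟨a, b⟩ := size
  obtain ⟨ha, hb⟩ := hd
  have h1 : 1 ≤ a * b := by nlinarith
  have hcells : PySem.List.pyRange 0 a 1 = [] := PySem.List.pyRange_one_eq_nil (by omega)
  have hA : (create_op_maps_py (a, b)).head? = some (List.replicate (a*b).toNat 0) := by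
    rw [A_eq]; split <;> simp [mkA, hcells]
  have hB : (create_op_maps_py_alt (a, b)).head? = some [] := by
    simp only [create_op_maps_py_alt]; split <;> simp [hcells]
  rw [heq, hB] at hA
  simp only [Option.some.injEq] at hA
  have h0 := congrArg List.length hA
  simp at h0
  omega
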